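-- pv_equiv track=rewrite | github.com/DimaVasiliu/timrx-3d-print | backend/services/pricing_service.py | _is_seedance_variant_code
-- ===== SOURCE A (Python) =====
-- def _is_seedance_variant_code(action_key: str) -> bool:
--     """
--     Check if an action key is a Seedance variant code.
--
--     Pattern: seedance_{fast|preview}_{text_generate|image_animate}_{duration}s
--     """
--     if not action_key.startswith("seedance_"):
--         return False
--
--     valid_prefixes = (
--         "seedance_fast_text_generate_",
--         "seedance_fast_image_animate_",
--         "seedance_preview_text_generate_",
--         "seedance_preview_image_animate_",
--     )
--     for prefix in valid_prefixes:
--         if action_key.startswith(prefix):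
--             suffix = action_key[len(prefix):]
--             return suffix in {"5s", "10s", "15s"}
--
--     return False
-- ===== SOURCE B (Python) =====
-- _VALID_KEYS = frozenset(
--     f"seedance_{speed}_{mode}_{dur}s"
--     for speed in ("fast", "preview")
--     for mode in ("text_generate", "image_animate")
--     for dur in (5, 10, 15)
-- )
--
--
-- def _is_seedance_variant_code(action_key: str) -> bool:
--     return action_key in _VALID_KEYS
-- ===== Notes on version B (the rewrite author's own statement) =====
-- stated objective: idiomatic
-- what changed: Replaced the hand-rolled prefix loop plus suffix-set test by a precomputed frozenset of all 12 valid keys (built once by a comprehension) and a single membership test.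
import Mathlib
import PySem

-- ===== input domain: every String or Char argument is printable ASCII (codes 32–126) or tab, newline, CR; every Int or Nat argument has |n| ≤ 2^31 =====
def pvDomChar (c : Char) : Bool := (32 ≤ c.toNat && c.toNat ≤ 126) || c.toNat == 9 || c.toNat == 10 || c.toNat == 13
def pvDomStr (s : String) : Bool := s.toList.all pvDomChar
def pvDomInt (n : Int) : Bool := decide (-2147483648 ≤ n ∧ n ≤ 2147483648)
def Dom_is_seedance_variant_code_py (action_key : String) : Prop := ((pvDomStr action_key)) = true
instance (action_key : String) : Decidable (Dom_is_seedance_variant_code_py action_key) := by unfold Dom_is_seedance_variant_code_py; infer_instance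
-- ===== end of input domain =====

-- B replaces A's hand-rolled prefix loop + suffix-set test by one membership test in a
-- precomputed set of all 12 valid keys (idiomatic; same cost).


-- ===== PORT A =====
-- the 'for prefix in valid_prefixes' loop with its early return
def seedanceLoop (action_key : String) : List String → Bool
  | [] => false
  | p :: rest =>
    if PySem.Str.startswith action_key p then
      (PySem.Set.ofList ["5s", "10s", "15s"]).contains
        (PySem.Str.slice action_key (some (PySem.Str.len p)) none)
    else seedanceLoop action_key rest

def is_seedance_variant_code_py (action_key : String) : Bool :=
  if !(PySem.Str.startswith action_key "seedance_") then false
  else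
    seedanceLoop action_key
      ["seedance_fast_text_generate_", "seedance_fast_image_animate_",
       "seedance_preview_text_generate_", "seedance_preview_image_animate_"]

-- ===== PORT B =====
-- the module-level frozenset comprehension of Source B (strings as their char lists)
def seedance_valid_keys : PySem.Set (List Char) :=
  PySem.Set.ofList (
    (["fast", "preview"] : List String).flatMap fun speed =>
      (["text_generate", "image_animate"] : List String).flatMap fun mode =>
        (([5, 10, 15] : List Int)).map fun dur =>
          "seedance_".toList ++ speed.toList ++ "_".toList ++ mode.toList
            ++ "_".toList ++ (PySem.Int.toStr dur).toList ++ "s".toList)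

def is_seedance_variant_code_py_alt (action_key : String) : Bool :=
  PySem.Set.contains seedance_valid_keys action_key.toList

-- ===== PRECONDITION & SPEC =====
def Spec_is_seedance_variant_code_py (action_key : String) (out : Bool) : Prop := out = is_seedance_variant_code_py_alt action_key
instance (action_key : String) (out : Bool) : Decidable (Spec_is_seedance_variant_code_py action_key out) := by unfold Spec_is_seedance_variant_code_py; infer_instance

-- ===== CLAIM (what is proved, stated in full; the proofs are below) =====
def Claim_equal_is_seedance_variant_code_py : Prop := ∀ (action_key : String), Dom_is_seedance_variant_code_py action_key → Spec_is_seedance_variant_code_py action_key (is_seedance_variant_code_py action_key)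

-- ===== LEMMAS AND PROOFS =====
theorem seedance_keys_eval : (seedance_valid_keys : List (List Char)) =
    ["seedance_fast_text_generate_5s".toList, "seedance_fast_text_generate_10s".toList,
     "seedance_fast_text_generate_15s".toList, "seedance_fast_image_animate_5s".toList,
     "seedance_fast_image_animate_10s".toList, "seedance_fast_image_animate_15s".toList,
     "seedance_preview_text_generate_5s".toList, "seedance_preview_text_generate_10s".toList,
     "seedance_preview_text_generate_15s".toList, "seedance_preview_image_animate_5s".toList,
     "seedance_preview_image_animate_10s".toList, "seedance_preview_image_animate_15s".toList] := by
  decide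

theorem seedance_alt_iff (s : String) :
    is_seedance_variant_code_py_alt s = true ↔
      s.toList ∈ (seedance_valid_keys : List (List Char)) := by
  simp [is_seedance_variant_code_py_alt, PySem.Set.contains]

-- a matched prefix splits the key: s = p ++ s[len(p):]
theorem seedance_prefix_split (s p : String) (hp : PySem.Str.startswith s p = true) :
    s.toList = p.toList ++ (PySem.Str.slice s (some (PySem.Str.len p)) none).toList := by
  obtain ⟨t, ht⟩ := (PySem.Chars.startswith_iff s.toList p.toList).mp (by simpa using hp)
  have hd : (PySem.Str.slice s (some (PySem.Str.len p)) none).toList = t := by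
    rw [PySem.Str.toList_slice, PySem.Chars.slice_eq_listSlice,
        PySem.Str.len_eq, PySem.List.slice_from_natCast]
    simp [← ht]
  rw [hd, ht]

-- a matched loop branch pins s down to one of the three full keys for that prefix
theorem seedance_branch_mem (s p : String) (hp : PySem.Str.startswith s p = true)
    (hA : (PySem.Set.ofList ["5s", "10s", "15s"]).contains
        (PySem.Str.slice s (some (PySem.Str.len p)) none) = true) :
    s.toList = p.toList ++ "5s".toList ∨ s.toList = p.toList ++ "10s".toList ∨
      s.toList = p.toList ++ "15s".toList := by
  have hsuf := seedance_prefix_split s p hp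
  have hmem' : PySem.Str.slice s (some (PySem.Str.len p)) none ∈ (["5s", "10s", "15s"] : List String) := by
    simpa [PySem.Set.contains] using hA
  simp only [List.mem_cons, List.not_mem_nil, or_false] at hmem'
  rcases hmem' with h | h | h
  · exact Or.inl (by rw [hsuf, h])
  · exact Or.inr (Or.inl (by rw [hsuf, h]))
  · exact Or.inr (Or.inr (by rw [hsuf, h]))

-- ===== VERDICT (by name: the statement is the Claim_ definition above) =====
theorem is_seedance_variant_code_py_spec : Claim_equal_is_seedance_variant_code_py := by
  intro s _
  unfold Spec_is_seedance_variant_code_py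
  by_cases hmem : s.toList ∈ (seedance_valid_keys : List (List Char))
  · rw [(seedance_alt_iff s).mpr hmem]
    rw [seedance_keys_eval] at hmem
    simp only [List.mem_cons, List.not_mem_nil, or_false] at hmem
    rcases hmem with h | h | h | h | h | h | h | h | h | h | h | h <;>
      · rw [String.toList_inj.mp h]; decide
  · have hB : is_seedance_variant_code_py_alt s = false := by
      rw [← Bool.not_eq_true]; exact mt (seedance_alt_iff s).mp hmem
    rw [hB, ← Bool.not_eq_true]
    intro hA
    apply hmem
    rw [seedance_keys_eval]
    simp only [List.mem_cons, List.not_mem_nil, or_false]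
    revert hA
    simp only [is_seedance_variant_code_py, seedanceLoop]
    split_ifs with h0 h1 h2 h3 h4 <;> intro hA
    · exact absurd hA (by simp)
    · rcases seedance_branch_mem s "seedance_fast_text_generate_" h1 hA with h | h | h <;>
        rw [h] <;> decide
    · rcases seedance_branch_mem s "seedance_fast_image_animate_" h2 hA with h | h | h <;>
        rw [h] <;> decide
    · rcases seedance_branch_mem s "seedance_preview_text_generate_" h3 hA with h | h | h <;>
        rw [h] <;> decide
    · rcases seedance_branch_mem s "seedance_preview_image_animate_" h4 hA with h | h | h <;>
        rw [h] <;> decide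
    · exact absurd hA (by simp)
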